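-- pv_equiv track=rewrite | github.com/papanokechi/wallis-pcf-lean4 | alpha_shape_investigation.py | factored_form
-- ===== SOURCE A (Python) =====
-- def format_poly(coeffs, var="n"):
--     """Human-readable polynomial string."""
--     terms = []
--     for i, c in enumerate(coeffs):
--         if c == 0:
--             continue
--         if i == 0:
--             terms.append(str(c))
--         elif i == 1:
--             if c == 1: terms.append(var)
--             elif c == -1: terms.append(f"-{var}")
--             else: terms.append(f"{c}{var}")
--         else:
--             if c == 1: terms.append(f"{var}^{i}")
--             elif c == -1: terms.append(f"-{var}^{i}")
--             else: terms.append(f"{c}{var}^{i}")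
--     if not terms:
--         return "0"
--     result = terms[0]
--     for t in terms[1:]:
--         if t.startswith("-"):
--             result += f" - {t[1:]}"
--         else:
--             result += f" + {t}"
--     return result
--
-- def factored_form(coeffs):
--     """Try to factor the polynomial over integers."""
--     # Check for common root at n=0
--     if coeffs[0] == 0:
--         inner = coeffs[1:]
--         return f"n * ({format_poly(inner, 'n')})"
--
--     # Check if evaluates to 0 at small integers
--     roots = []
--     for r in range(-10, 11):
--         val = sum(c * r**i for i, c in enumerate(coeffs))
--         if val == 0:
--             roots.append(r)
--
--     if roots:
--         return f"roots at n={roots}, poly={format_poly(coeffs, 'n')}"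
--     return format_poly(coeffs, "n")
-- ===== SOURCE B (Python) =====
-- def _horner(coeffs, x):
--     acc = 0
--     for c in reversed(coeffs):
--         acc = acc * x + c
--     return acc
--
-- def _term(i, c, var):
--     if i == 0:
--         return str(c)
--     p = var if i == 1 else f"{var}^{i}"
--     if c == 1:
--         return p
--     if c == -1:
--         return "-" + p
--     return f"{c}{p}"
--
-- def _poly_str(coeffs, var="n"):
--     terms = [_term(i, c, var) for i, c in enumerate(coeffs) if c != 0]
--     if not terms:
--         return "0"
--     return terms[0] + "".join(
--         " - " + t[1:] if t.startswith("-") else " + " + t for t in terms[1:]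
--     )
--
-- def factored_form(coeffs):
--     if coeffs[0] == 0:
--         return f"n * ({_poly_str(coeffs[1:])})"
--     roots = [r for r in range(-10, 11) if _horner(coeffs, r) == 0]
--     if roots:
--         return f"roots at n=[{', '.join(str(r) for r in roots)}], poly={_poly_str(coeffs)}"
--     return _poly_str(coeffs)
-- ===== Notes on version B (the rewrite author's own statement) =====
-- stated objective: faster
-- what changed: Root testing evaluates the polynomial by a Horner accumulator fold over the reversed coefficients instead of summing c*r**i with an independent power per term, and the formatting is rebuilt as a term helper + filtered comprehension + join instead of an append loop with inline branch bodies.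
import Mathlib
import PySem

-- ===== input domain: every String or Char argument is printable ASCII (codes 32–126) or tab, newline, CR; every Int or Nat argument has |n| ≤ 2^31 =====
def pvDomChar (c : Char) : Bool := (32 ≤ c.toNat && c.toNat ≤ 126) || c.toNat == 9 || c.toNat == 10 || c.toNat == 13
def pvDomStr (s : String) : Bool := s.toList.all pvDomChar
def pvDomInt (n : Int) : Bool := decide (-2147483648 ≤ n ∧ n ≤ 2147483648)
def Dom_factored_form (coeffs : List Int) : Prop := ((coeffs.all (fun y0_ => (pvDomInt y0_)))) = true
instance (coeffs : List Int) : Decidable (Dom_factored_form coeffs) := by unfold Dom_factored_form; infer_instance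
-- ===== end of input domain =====

-- B replaces the per-point power sum by a Horner fold (asymptotically fewer multiplications
-- per evaluated point) and rebuilds the formatting as term helper + filter/map + join.

-- ===== PORT A =====
-- A's format_poly: loop over enumerate appending term strings, then a join loop.
def pvA_formatPoly (coeffs : List Int) (var : List Char) : List Char :=
  let terms := (PySem.List.enumerate coeffs).foldl (fun ts ic =>
    if ic.2 = 0 then ts
    else if ic.1 = 0 then ts ++ [PySem.Int.toChars ic.2]
    else if ic.1 = 1 then
      if ic.2 = 1 then ts ++ [var]
      else if ic.2 = -1 then ts ++ ['-' :: var]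
      else ts ++ [PySem.Int.toChars ic.2 ++ var]
    else
      if ic.2 = 1 then ts ++ [var ++ '^' :: PySem.Int.toChars ic.1]
      else if ic.2 = -1 then ts ++ ['-' :: (var ++ '^' :: PySem.Int.toChars ic.1)]
      else ts ++ [PySem.Int.toChars ic.2 ++ (var ++ '^' :: PySem.Int.toChars ic.1)]) []
  match terms with
  | [] => ['0']
  | t0 :: rest =>
    rest.foldl (fun res t =>
      if PySem.Chars.startswith t ['-'] then res ++ (' ' :: '-' :: ' ' :: t.drop 1)
      else res ++ (' ' :: '+' :: ' ' :: t)) t0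

def factored_form (coeffs : List Int) : String :=
  match coeffs with
  | [] => ""   -- Python raises IndexError indexing the first coefficient; excluded by Pre_
  | c0 :: rest =>
    if c0 = 0 then
      String.ofList ("n * (".toList ++ pvA_formatPoly rest ['n'] ++ [')'])
    else
      -- val = sum(c * r**i for i, c in enumerate(coeffs)); roots collected by an append loop
      let roots := (PySem.List.pyRange (-10) 11 1).foldl (fun rs r =>
        if (PySem.List.enumerate (c0 :: rest)).foldl
            (fun s ic => s + ic.2 * r ^ ic.1.toNat) 0 = 0
        then rs ++ [r] else rs) []
      if roots = [] then String.ofList (pvA_formatPoly (c0 :: rest) ['n'])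
      else String.ofList ("roots at n=[".toList
            ++ PySem.Chars.join [',', ' '] (roots.map PySem.Int.toChars)
            ++ "], poly=".toList ++ pvA_formatPoly (c0 :: rest) ['n'])

-- ===== PORT B =====
-- B's Horner evaluation: acc = acc*x + c over reversed(coeffs).
def pvB_horner (coeffs : List Int) (x : Int) : Int :=
  coeffs.reverse.foldl (fun acc c => acc * x + c) 0

-- B's per-term formatter.
def pvB_term (i : Int) (c : Int) (var : List Char) : List Char :=
  if i = 0 then PySem.Int.toChars c
  else
    let p := if i = 1 then var else var ++ '^' :: PySem.Int.toChars i
    if c = 1 then p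
    else if c = -1 then '-' :: p
    else PySem.Int.toChars c ++ p

-- B's _poly_str: filtered comprehension of terms, then first-term ++ "".join of the rest.
def pvB_polyStr (coeffs : List Int) (var : List Char) : List Char :=
  let terms := ((PySem.List.enumerate coeffs).filter (fun ic => ic.2 ≠ 0)).map
                 (fun ic => pvB_term ic.1 ic.2 var)
  match terms with
  | [] => ['0']
  | t0 :: rest =>
    t0 ++ PySem.Chars.join [] (rest.map (fun t =>
      if PySem.Chars.startswith t ['-'] then ' ' :: '-' :: ' ' :: t.drop 1
      else ' ' :: '+' :: ' ' :: t))

def factored_form_alt (coeffs : List Int) : String :=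
  match coeffs with
  | [] => ""   -- Python raises IndexError indexing the first coefficient; excluded by Pre_
  | c0 :: rest =>
    if c0 = 0 then
      String.ofList ("n * (".toList ++ pvB_polyStr rest ['n'] ++ [')'])
    else
      let roots := (PySem.List.pyRange (-10) 11 1).filter
                     (fun r => pvB_horner (c0 :: rest) r = 0)
      if roots = [] then String.ofList (pvB_polyStr (c0 :: rest) ['n'])
      else String.ofList ("roots at n=[".toList
            ++ PySem.Chars.join [',', ' '] (roots.map PySem.Int.toChars)
            ++ "], poly=".toList ++ pvB_polyStr (c0 :: rest) ['n'])

-- ===== PRECONDITION & SPEC =====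
-- Pre_ excludes only the empty list, on which Python A (and B) raise IndexError indexing the first coefficient.
def Pre_factored_form (coeffs : List Int) : Prop := coeffs ≠ []
instance (coeffs : List Int) : Decidable (Pre_factored_form coeffs) := by
  unfold Pre_factored_form; infer_instance
def pvWitness_factored_form : List Int := ([1, 2])

def Spec_factored_form (coeffs : List Int) (out : String) : Prop := out = factored_form_alt coeffs
instance (coeffs : List Int) (out : String) : Decidable (Spec_factored_form coeffs out) := by
  unfold Spec_factored_form; infer_instance

-- ===== CLAIM (what is proved, stated in full; the proofs are below) =====
def Claim_equal_factored_form : Prop := ∀ (coeffs : List Int), Dom_factored_form coeffs →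
  Pre_factored_form coeffs → Spec_factored_form coeffs (factored_form coeffs)

-- ===== LEMMAS AND PROOFS =====

-- the common mathematical value both evaluation strategies compute
def pvEval (coeffs : List Int) (r : Int) : Int :=
  coeffs.foldr (fun c acc => acc * r + c) 0

theorem pvB_horner_eq (coeffs : List Int) (r : Int) :
    pvB_horner coeffs r = pvEval coeffs r := by
  unfold pvB_horner pvEval
  exact List.foldl_reverse

theorem pvA_sum_eq (r : Int) (cs : List Int) : ∀ (k : Nat) (s : Int),
    (PySem.List.enumerate cs (k : Int)).foldl (fun s ic => s + ic.2 * r ^ ic.1.toNat) s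
      = s + r ^ k * pvEval cs r := by
  induction cs with
  | nil => intro k s; simp [PySem.List.enumerate_nil, pvEval]
  | cons c t ih =>
    intro k s
    rw [PySem.List.enumerate_cons]
    have hcast : (k : Int) + 1 = ((k + 1 : Nat) : Int) := by push_cast; ring
    simp only [List.foldl_cons, hcast, ih (k + 1)]
    simp only [Int.toNat_natCast, pvEval, List.foldr_cons]
    ring

-- A's term-building loop yields exactly B's filtered/mapped terms
theorem pvTerms_eq (coeffs : List Int) (var : List Char) :
    (PySem.List.enumerate coeffs).foldl (fun ts ic =>
      if ic.2 = 0 then ts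
      else if ic.1 = 0 then ts ++ [PySem.Int.toChars ic.2]
      else if ic.1 = 1 then
        if ic.2 = 1 then ts ++ [var]
        else if ic.2 = -1 then ts ++ ['-' :: var]
        else ts ++ [PySem.Int.toChars ic.2 ++ var]
      else
        if ic.2 = 1 then ts ++ [var ++ '^' :: PySem.Int.toChars ic.1]
        else if ic.2 = -1 then ts ++ ['-' :: (var ++ '^' :: PySem.Int.toChars ic.1)]
        else ts ++ [PySem.Int.toChars ic.2 ++ (var ++ '^' :: PySem.Int.toChars ic.1)]) []
    = ((PySem.List.enumerate coeffs).filter (fun ic => ic.2 ≠ 0)).map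
        (fun ic => pvB_term ic.1 ic.2 var) := by
  have hbody : (fun (ts : List (List Char)) (ic : Int × Int) =>
      if ic.2 = 0 then ts
      else if ic.1 = 0 then ts ++ [PySem.Int.toChars ic.2]
      else if ic.1 = 1 then
        if ic.2 = 1 then ts ++ [var]
        else if ic.2 = -1 then ts ++ ['-' :: var]
        else ts ++ [PySem.Int.toChars ic.2 ++ var]
      else
        if ic.2 = 1 then ts ++ [var ++ '^' :: PySem.Int.toChars ic.1]
        else if ic.2 = -1 then ts ++ ['-' :: (var ++ '^' :: PySem.Int.toChars ic.1)]
        else ts ++ [PySem.Int.toChars ic.2 ++ (var ++ '^' :: PySem.Int.toChars ic.1)])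
    = (fun ts ic =>
        if (fun (ic : Int × Int) => decide (ic.2 ≠ 0)) ic = true
        then ts ++ [(fun (ic : Int × Int) => pvB_term ic.1 ic.2 var) ic] else ts) := by
    funext ts ic
    by_cases h0 : ic.2 = 0
    · simp [h0]
    · simp only [h0, if_false, decide_not]
      unfold pvB_term
      by_cases hi0 : ic.1 = 0
      · simp [hi0]
      · by_cases hi1 : ic.1 = 1 <;> by_cases hc1 : ic.2 = 1 <;> by_cases hcm : ic.2 = -1 <;>
          simp_all
  rw [hbody, PySem.List.foldl_append_if]
  simp

theorem pvJoin_nil_flatten (l : List (List Char)) :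
    PySem.Chars.join [] l = l.flatten := by
  unfold PySem.Chars.join
  induction l with
  | nil => simp [List.intercalate]
  | cons a t ih =>
    cases t with
    | nil => simp [List.intercalate]
    | cons b u =>
      simp only [List.intercalate, List.intersperse_cons₂, List.flatten_cons] at *
      simpa using ih

theorem pvJoinLoop_eq (sep : List Char → List Char) :
    ∀ (rest : List (List Char)) (t0 : List Char),
    rest.foldl (fun res t => res ++ sep t) t0 = t0 ++ PySem.Chars.join [] (rest.map sep) := by
  intro rest t0
  rw [pvJoin_nil_flatten, PySem.List.foldl_append_eq_flatMap]
  simp [List.flatMap_def]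

theorem pvFormatPoly_eq (coeffs : List Int) (var : List Char) :
    pvA_formatPoly coeffs var = pvB_polyStr coeffs var := by
  unfold pvA_formatPoly pvB_polyStr
  rw [pvTerms_eq]
  cases h : ((PySem.List.enumerate coeffs).filter (fun ic => ic.2 ≠ 0)).map
      (fun ic => pvB_term ic.1 ic.2 var) with
  | nil => rfl
  | cons t0 rest =>
    simp only
    rw [show (fun (res t : List Char) =>
          if PySem.Chars.startswith t ['-'] then res ++ (' ' :: '-' :: ' ' :: t.drop 1)
          else res ++ (' ' :: '+' :: ' ' :: t))
        = (fun res t => res ++ (if PySem.Chars.startswith t ['-']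
            then ' ' :: '-' :: ' ' :: t.drop 1 else ' ' :: '+' :: ' ' :: t)) from by
      funext res t; split <;> rfl]
    exact pvJoinLoop_eq _ rest t0

theorem pvRoots_eq (c0 : Int) (rest : List Int) :
    (PySem.List.pyRange (-10) 11 1).foldl (fun rs r =>
        if (PySem.List.enumerate (c0 :: rest)).foldl
            (fun s ic => s + ic.2 * r ^ ic.1.toNat) 0 = 0
        then rs ++ [r] else rs) []
    = (PySem.List.pyRange (-10) 11 1).filter (fun r => pvB_horner (c0 :: rest) r = 0) := by
  have hbody : (fun (rs : List Int) (r : Int) =>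
      if (PySem.List.enumerate (c0 :: rest)).foldl
          (fun s ic => s + ic.2 * r ^ ic.1.toNat) 0 = 0
      then rs ++ [r] else rs)
    = (fun rs r => if (fun (r : Int) => decide (pvB_horner (c0 :: rest) r = 0)) r = true
        then rs ++ [(fun (r : Int) => r) r] else rs) := by
    funext rs r
    have : (PySem.List.enumerate (c0 :: rest)).foldl
        (fun s ic => s + ic.2 * r ^ ic.1.toNat) 0 = pvB_horner (c0 :: rest) r := by
      have h := pvA_sum_eq r (c0 :: rest) 0 0
      simp only [Nat.cast_zero] at h
      rw [h, pvB_horner_eq]; ring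
    rw [this]
    simp
  rw [hbody, PySem.List.foldl_append_if]
  simp

-- ===== VERDICT (by name: the statement is the Claim_ definition above) =====
theorem factored_form_spec : Claim_equal_factored_form := by
  intro coeffs _ hpre
  unfold Spec_factored_form
  cases coeffs with
  | nil => exact absurd rfl hpre
  | cons c0 rest =>
    simp only [factored_form, factored_form_alt]
    by_cases h0 : c0 = 0
    · simp [h0, pvFormatPoly_eq]
    · rw [if_neg h0, if_neg h0, pvRoots_eq, pvFormatPoly_eq]
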